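-- pv_equiv track=rewrite | github.com/dariavasile/DataInTheWildProject | Data Processing/size_converter_asos.py | extract_min_max_sizes
-- ===== SOURCE A (Python) =====
-- def extract_min_max_sizes(sizes):
--     size_list = sizes.split('/')
--     size_list = [s.strip() for s in size_list]
--     sizes_order = ['XXS','XS', 'S', 'M', 'L', 'XL', 'XXL','2XL','3XL','4XL','5XL', '6XL']
--     min_size = max_size = None
--
--     for size in size_list:
--         if size in sizes_order:
--             if min_size is None or sizes_order.index(size) < sizes_order.index(min_size):
--                 min_size = size
--             if max_size is None or sizes_order.index(size) > sizes_order.index(max_size):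
--                 max_size = size
--
--     return min_size, max_size
-- ===== SOURCE B (Python) =====
-- _ORDER = ['XXS', 'XS', 'S', 'M', 'L', 'XL', 'XXL', '2XL', '3XL', '4XL', '5XL', '6XL']
--
--
-- def extract_min_max_sizes(sizes):
--     # Scan the fixed 12-entry size table instead of the token list: the minimum is the
--     # first table entry present among the tokens, the maximum the last one.
--     present = {t.strip() for t in sizes.split('/')}
--     mn = next((s for s in _ORDER if s in present), None)
--     mx = next((s for s in reversed(_ORDER) if s in present), None)
--     return mn, mx
-- ===== Notes on version B (the rewrite author's own statement) =====
-- stated objective: simpler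
-- what changed: Inverts the traversal: instead of A's fused running-min/max loop over the tokens with repeated list.index scans of the size table, B builds the set of stripped tokens once and scans the fixed 12-entry size table itself, taking the first entry present as the minimum and (scanning the table reversed) the last entry present as the maximum.
import Mathlib
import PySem

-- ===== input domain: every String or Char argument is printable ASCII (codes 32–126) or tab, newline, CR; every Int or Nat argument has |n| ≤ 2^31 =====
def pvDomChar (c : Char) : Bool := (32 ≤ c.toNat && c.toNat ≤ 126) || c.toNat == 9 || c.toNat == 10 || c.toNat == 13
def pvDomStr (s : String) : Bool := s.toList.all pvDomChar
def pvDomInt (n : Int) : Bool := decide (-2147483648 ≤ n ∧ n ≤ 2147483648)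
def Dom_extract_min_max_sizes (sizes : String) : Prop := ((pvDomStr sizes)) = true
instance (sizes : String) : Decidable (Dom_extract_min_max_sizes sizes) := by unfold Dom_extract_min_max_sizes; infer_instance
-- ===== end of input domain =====

-- B inverts the traversal: instead of A's fused running-min/max loop over the tokens (which
-- rescans the size table with .index at every step), B builds the set of stripped tokens once
-- and scans the fixed 12-entry size table: the first entry present is the minimum, the first
-- entry of the reversed table present is the maximum (objective: simpler).

-- ===== PORT A =====
def pvSizesOrder : List String :=
  ["XXS", "XS", "S", "M", "L", "XL", "XXL", "2XL", "3XL", "4XL", "5XL", "6XL"]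

-- sizes_order.index(s): Python raises ValueError when s is absent; A only calls it on
-- members of sizes_order, where index? is some, so getD 0 is exact there.
def pvIdxA (s : String) : Nat := (PySem.List.index? pvSizesOrder s).getD 0

def pvStepA (st : Option String × Option String) (size : String) : Option String × Option String :=
  if pvSizesOrder.contains size then
    let mn : Option String :=
      match st.1 with
      | none => some size
      | some m => if pvIdxA size < pvIdxA m then some size else some m
    let mx : Option String :=
      match st.2 with
      | none => some size
      | some m => if pvIdxA size > pvIdxA m then some size else some m
    (mn, mx)
  else st

def extract_min_max_sizes (sizes : String) : Option String × Option String :=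
  -- sizes.split('/'): the separator is the non-empty literal '/', so split? is some; getD [] is exact
  let size_list := (PySem.Str.split? sizes "/").getD []
  let size_list := size_list.map PySem.Str.strip
  size_list.foldl pvStepA (none, none)

-- ===== PORT B =====
-- Source B's _ORDER is the same 12-element literal as A's sizes_order
def pvOrderB : List String :=
  ["XXS", "XS", "S", "M", "L", "XL", "XXL", "2XL", "3XL", "4XL", "5XL", "6XL"]

def extract_min_max_sizes_alt (sizes : String) : Option String × Option String :=
  -- present = {t.strip() for t in sizes.split('/')}
  let present : PySem.Set String :=
    PySem.Set.ofList (((PySem.Str.split? sizes "/").getD []).map PySem.Str.strip)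
  -- next((s for s in _ORDER if s in present), None) / same over reversed(_ORDER)
  (pvOrderB.find? (fun s => PySem.Set.contains present s),
   pvOrderB.reverse.find? (fun s => PySem.Set.contains present s))

-- ===== PRECONDITION & SPEC =====
def Spec_extract_min_max_sizes (sizes : String) (out : Option String × Option String) : Prop := out = extract_min_max_sizes_alt sizes
instance (sizes : String) (out : Option String × Option String) : Decidable (Spec_extract_min_max_sizes sizes out) := by unfold Spec_extract_min_max_sizes; infer_instance

-- ===== CLAIM (what is proved, stated in full; the proofs are below) =====
def Claim_equal_extract_min_max_sizes : Prop := ∀ (sizes : String), Dom_extract_min_max_sizes sizes → Spec_extract_min_max_sizes sizes (extract_min_max_sizes sizes)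

-- ===== LEMMAS AND PROOFS =====

-- the rank of a token in the size table, if it is a valid size
def pvRank? (t : String) : Option Nat := PySem.List.index? pvSizesOrder t

-- the ranks of the valid tokens, in token order
def pvRanks (toks : List String) : List Nat := toks.filterMap pvRank?

-- the common normal form of both programs' results: min/max over the rank list,
-- looked back up in the table
def pvOut : List Nat → Option String × Option String
  | [] => (none, none)
  | x :: tl => (pvSizesOrder[tl.foldl min x]?, pvSizesOrder[tl.foldl max x]?)

lemma pvRank_none {t : String} (h : pvRank? t = none) : pvSizesOrder.contains t = false := by
  rw [pvRank?, PySem.List.index?_eq_none_iff] at h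
  simpa using h

lemma pvRank_facts {t : String} {j : Nat} (h : pvRank? t = some j) :
    j < 12 ∧ pvSizesOrder[j]? = some t ∧ pvSizesOrder.contains t = true ∧ pvIdxA t = j := by
  obtain ⟨hk, hget, -⟩ := PySem.List.getElem_of_index?_eq_some h
  refine ⟨hk, ?_, ?_, ?_⟩
  · rw [List.getElem?_eq_getElem hk, hget]
  · have : t ∈ pvSizesOrder := hget ▸ List.getElem_mem hk
    simpa using this
  · rw [pvIdxA, pvRank?] at *
    rw [h]; rfl

lemma pvRank_getElem : ∀ j : Nat, j < 12 → ∀ (hj : j < pvSizesOrder.length),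
    pvRank? pvSizesOrder[j] = some j := by decide

-- A's state step, when the new token has rank j and the state is pvOut acc
lemma pvStep_some {t : String} {j : Nat} (ht : pvRank? t = some j) (acc : List Nat)
    (hacc : ∀ i ∈ acc, i < 12) :
    pvStepA (pvOut acc) t = pvOut (acc ++ [j]) := by
  obtain ⟨hj12, hjt, hct, hit⟩ := pvRank_facts ht
  cases acc with
  | nil =>
      simp only [pvOut, pvStepA, hct, if_true, List.nil_append, List.foldl]
      exact Prod.ext hjt.symm hjt.symm
  | cons x tl =>
      have hm : tl.foldl min x < 12 := by
        rcases PySem.List.foldl_min_mem tl x with h | h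
        · rw [h]; exact hacc x List.mem_cons_self
        · exact hacc _ (List.mem_cons_of_mem x h)
      have hM : tl.foldl max x < 12 := by
        rcases PySem.List.foldl_max_mem tl x with h | h
        · rw [h]; exact hacc x List.mem_cons_self
        · exact hacc _ (List.mem_cons_of_mem x h)
      have happ : (x :: tl) ++ [j] = x :: (tl ++ [j]) := rfl
      simp only [pvOut, pvStepA, hct, if_true, happ, List.foldl_append, List.foldl]
      have hmlen : tl.foldl min x < pvSizesOrder.length := by simpa using hm
      have hMlen : tl.foldl max x < pvSizesOrder.length := by simpa using hM
      refine Prod.ext ?_ ?_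
      · rw [List.getElem?_eq_getElem hmlen]
        have hiu := pvRank_facts (pvRank_getElem _ hm hmlen)
        simp only [hit, hiu.2.2.2]
        by_cases hlt : j < tl.foldl min x
        · rw [if_pos hlt, min_eq_right hlt.le, hjt]
        · rw [if_neg hlt, min_eq_left (by omega), List.getElem?_eq_getElem hmlen]
      · rw [List.getElem?_eq_getElem hMlen]
        have hiu := pvRank_facts (pvRank_getElem _ hM hMlen)
        simp only [hit, hiu.2.2.2, gt_iff_lt]
        by_cases hlt : tl.foldl max x < j
        · rw [if_pos hlt, max_eq_right hlt.le, hjt]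
        · rw [if_neg hlt, max_eq_left (by omega), List.getElem?_eq_getElem hMlen]

-- A's fold computes pvOut of the rank list
lemma pvMainA (toks : List String) (acc : List Nat) (hacc : ∀ i ∈ acc, i < 12) :
    toks.foldl pvStepA (pvOut acc) = pvOut (acc ++ pvRanks toks) := by
  induction toks generalizing acc with
  | nil => simp [pvRanks]
  | cons t toks ih =>
      cases hgt : pvRank? t with
      | none =>
          have hstep : pvStepA (pvOut acc) t = pvOut acc := by
            simp only [pvStepA, pvRank_none hgt, Bool.false_eq_true, if_false]
          simp only [List.foldl_cons, pvRanks, List.filterMap_cons, hgt, hstep]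
          exact ih acc hacc
      | some j =>
          have hacc' : ∀ i ∈ acc ++ [j], i < 12 := by
            intro i hi
            rcases List.mem_append.mp hi with h | h
            · exact hacc i h
            · simp only [List.mem_singleton] at h; subst h; exact (pvRank_facts hgt).1
          simp only [List.foldl_cons, pvRanks, List.filterMap_cons, hgt,
            pvStep_some hgt acc hacc]
          have := ih (acc ++ [j]) hacc'
          simpa [pvRanks] using this

-- membership test through the set of tokens is membership in the token list
lemma pvContains_set (toks : List String) (s : String) :
    PySem.Set.contains (PySem.Set.ofList toks) s = toks.contains s := by
  simp [PySem.Set.contains, PySem.Set.mem_ofList]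

-- B's first scan computes the table entry at the minimal rank
lemma pvFindMin (toks : List String) {x : Nat} {tl : List Nat} (h : pvRanks toks = x :: tl) :
    pvSizesOrder.find? (fun s => toks.contains s) = pvSizesOrder[tl.foldl min x]? := by
  set m := tl.foldl min x with hmdef
  have hmem : m ∈ x :: tl := by
    rcases PySem.List.foldl_min_mem tl x with h' | h'
    · rw [hmdef, h']; exact List.mem_cons_self
    · exact List.mem_cons_of_mem x h'
  obtain ⟨t, htmem, ht⟩ := List.mem_filterMap.mp (h ▸ hmem)
  obtain ⟨hm12, hmt, -, -⟩ := pvRank_facts ht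
  have hmlen : m < pvSizesOrder.length := by simpa using hm12
  have hget : pvSizesOrder[m] = t := by
    have := hmt; rw [List.getElem?_eq_getElem hmlen] at this; exact Option.some.inj this
  rw [hmt, List.find?_eq_some_iff_getElem]
  refine ⟨by simpa using htmem, m, hmlen, hget, ?_⟩
  intro i hi
  rw [Bool.not_eq_true']
  by_contra hq
  have hqi : pvSizesOrder[i] ∈ toks := by
    cases hb : toks.contains pvSizesOrder[i]
    · exact absurd hb hq
    · simpa using hb
  have hri : pvRank? pvSizesOrder[i] = some i :=
    pvRank_getElem i (by omega) _
  have hmemi : i ∈ pvRanks toks := List.mem_filterMap.mpr ⟨_, hqi, hri⟩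
  rw [h] at hmemi
  have : m ≤ i := by
    rcases List.mem_cons.mp hmemi with h' | h'
    · rw [h', hmdef]; exact (PySem.List.foldl_min_le tl x).1
    · exact (PySem.List.foldl_min_le tl x).2 i h'
  omega

-- B's reversed scan computes the table entry at the maximal rank
lemma pvFindMax (toks : List String) {x : Nat} {tl : List Nat} (h : pvRanks toks = x :: tl) :
    pvSizesOrder.reverse.find? (fun s => toks.contains s) = pvSizesOrder[tl.foldl max x]? := by
  set M := tl.foldl max x with hMdef
  have hmem : M ∈ x :: tl := by
    rcases PySem.List.foldl_max_mem tl x with h' | h'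
    · rw [hMdef, h']; exact List.mem_cons_self
    · exact List.mem_cons_of_mem x h'
  obtain ⟨t, htmem, ht⟩ := List.mem_filterMap.mp (h ▸ hmem)
  obtain ⟨hM12, hMt, -, -⟩ := pvRank_facts ht
  have hMlen : M < pvSizesOrder.length := by simpa using hM12
  have hget : pvSizesOrder[M] = t := by
    have := hMt; rw [List.getElem?_eq_getElem hMlen] at this; exact Option.some.inj this
  have hlen : pvSizesOrder.length = 12 := by decide
  have hrlen : pvSizesOrder.reverse.length = 12 := by decide
  have hi : 11 - M < pvSizesOrder.reverse.length := by omega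
  have hrev : pvSizesOrder.reverse[11 - M] = pvSizesOrder[M] := by
    rw [List.getElem_reverse]
    congr 1
    omega
  rw [hMt, List.find?_eq_some_iff_getElem]
  refine ⟨by simpa using htmem, 11 - M, hi, hrev.trans hget, ?_⟩
  intro i hij
  rw [Bool.not_eq_true']
  by_contra hq
  have hilen : i < pvSizesOrder.reverse.length := by omega
  have hrevi : pvSizesOrder.reverse[i] = pvSizesOrder[11 - i] := by
    rw [List.getElem_reverse]
    congr 1
  have hqi : pvSizesOrder[11 - i] ∈ toks := by
    rw [hrevi] at hq
    cases hb : toks.contains pvSizesOrder[11 - i]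
    · exact absurd hb hq
    · simpa using hb
  have hri : pvRank? pvSizesOrder[11 - i] = some (11 - i) :=
    pvRank_getElem (11 - i) (by omega) _
  have hmemi : (11 - i) ∈ pvRanks toks := List.mem_filterMap.mpr ⟨_, hqi, hri⟩
  rw [h] at hmemi
  have : 11 - i ≤ M := by
    rcases List.mem_cons.mp hmemi with h' | h'
    · rw [h', hMdef]; exact (PySem.List.le_foldl_max tl x).1
    · exact (PySem.List.le_foldl_max tl x).2 _ h'
  omega

-- B's result is pvOut of the rank list
lemma pvMainB (toks : List String) :
    (pvOrderB.find? (fun s => PySem.Set.contains (PySem.Set.ofList toks) s),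
     pvOrderB.reverse.find? (fun s => PySem.Set.contains (PySem.Set.ofList toks) s)) =
    pvOut (pvRanks toks) := by
  have hq : (fun s => PySem.Set.contains (PySem.Set.ofList toks) s) =
      (fun s => toks.contains s) := by
    funext s; exact pvContains_set toks s
  have hBO : pvOrderB = pvSizesOrder := rfl
  rw [hq, hBO]
  cases h : pvRanks toks with
  | nil =>
      have hall : ∀ t ∈ toks, pvRank? t = none := List.filterMap_eq_nil_iff.mp h
      have hnone : ∀ s ∈ pvSizesOrder, ¬ toks.contains s = true := by
        intro s hs hc
        have hsmem : s ∈ toks := by simpa using hc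
        have hc2 : pvSizesOrder.contains s = false := pvRank_none (hall s hsmem)
        rw [List.contains_eq_mem, decide_eq_false_iff_not] at hc2
        exact hc2 hs
      have h1 : List.find? (fun s => toks.contains s) pvSizesOrder = none :=
        List.find?_eq_none.mpr hnone
      have h2 : List.find? (fun s => toks.contains s) pvSizesOrder.reverse = none :=
        List.find?_eq_none.mpr (fun s hs => hnone s (List.mem_reverse.mp hs))
      simp only [pvOut, h1, h2]
  | cons x tl =>
      simp only [pvOut]
      exact Prod.ext (pvFindMin toks h) (pvFindMax toks h)

-- ===== VERDICT (by name: the statement is the Claim_ definition above) =====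
theorem extract_min_max_sizes_spec : Claim_equal_extract_min_max_sizes := by
  intro sizes _
  unfold Spec_extract_min_max_sizes extract_min_max_sizes extract_min_max_sizes_alt
  rw [pvMainB]
  simpa using pvMainA (((PySem.Str.split? sizes "/").getD []).map PySem.Str.strip) [] (by simp)
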